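-- pv_equiv track=rewrite | github.com/ezcafe/raspberry | homeassistant/custom_components/xiaomi_home/config_flow.py | _handle_devices_filter
-- ===== SOURCE A (Python) =====
-- from typing import Optional, Set, Tuple
--
-- def _handle_devices_filter(
--     devices: dict, logic_or: bool, item_in: dict, item_ex: dict
-- ) -> dict:
--     """Private method to filter devices."""
--     include_set: Set = set([])
--     if not item_in:
--         include_set = set(devices.keys())
--     else:
--         filter_item: list[set] = []
--         for key, value in item_in.items():
--             filter_item.append(set([
--                 did for did, info in devices.items()
--                 if str(info[key]) in value]))
--         include_set = (
--             set.union(*filter_item)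
--             if logic_or else set.intersection(*filter_item))
--     if not include_set:
--         return {}
--     if item_ex:
--         filter_item: list[set] = []
--         for key, value in item_ex.items():
--             filter_item.append(set([
--                 did for did, info in devices.items()
--                 if str(info[key]) in value]))
--         exclude_set: Set = (
--             set.union(*filter_item)
--             if logic_or else set.intersection(*filter_item))
--         if exclude_set:
--             include_set = include_set-exclude_set
--     if not include_set:
--         return {}
--     return {
--         did: info for did, info in devices.items() if did in include_set}
-- ===== SOURCE B (Python) =====
-- def _handle_devices_filter(
--     devices: dict, logic_or: bool, item_in: dict, item_ex: dict
-- ) -> dict: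
--     """Single pass over devices: decide each device directly with any/all
--     over the include/exclude criteria, no intermediate sets."""
--     combine = any if logic_or else all
--
--     def keep(info) -> bool:
--         if item_in and not combine(
--                 str(info[k]) in v for k, v in item_in.items()):
--             return False
--         return not (item_ex and combine(
--             str(info[k]) in v for k, v in item_ex.items()))
--
--     return {did: info for did, info in devices.items() if keep(info)}
-- ===== Notes on version B (the rewrite author's own statement) =====
-- stated objective: simpler
-- what changed: Replaced A's three global passes (build one did-set per criterion key, combine them with set.union/set.intersection, subtract, then re-filter the dict by set membership) with a single pass over devices.items() that decides each device directly via any/all over its own criteria values.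
-- outside the precondition, e.g. on _handle_devices_filter({'d': {'k': '1'}}, False, {'k': ['2']}, {'m': ['1']}): A returns {}, B returns {}
import Mathlib
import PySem

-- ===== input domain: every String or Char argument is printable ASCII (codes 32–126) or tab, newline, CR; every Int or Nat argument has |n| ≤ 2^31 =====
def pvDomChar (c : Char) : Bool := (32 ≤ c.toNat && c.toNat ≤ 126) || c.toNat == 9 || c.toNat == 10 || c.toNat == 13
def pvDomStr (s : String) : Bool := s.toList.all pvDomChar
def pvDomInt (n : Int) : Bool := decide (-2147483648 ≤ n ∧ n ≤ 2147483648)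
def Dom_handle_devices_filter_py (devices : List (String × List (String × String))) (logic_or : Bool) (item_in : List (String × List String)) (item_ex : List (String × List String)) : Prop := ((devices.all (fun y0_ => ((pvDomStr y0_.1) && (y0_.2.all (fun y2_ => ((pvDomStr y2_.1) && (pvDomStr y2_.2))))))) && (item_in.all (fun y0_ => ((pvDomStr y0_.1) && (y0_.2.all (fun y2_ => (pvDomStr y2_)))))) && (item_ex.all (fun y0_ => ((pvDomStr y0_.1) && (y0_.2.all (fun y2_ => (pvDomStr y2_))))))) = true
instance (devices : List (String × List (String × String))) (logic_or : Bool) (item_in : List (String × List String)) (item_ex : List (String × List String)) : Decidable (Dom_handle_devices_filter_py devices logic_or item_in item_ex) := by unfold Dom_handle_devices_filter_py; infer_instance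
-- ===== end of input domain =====

-- B replaces A's global set algebra (one did-set per criterion key, union/intersection,
-- subtraction, then a membership re-filter) by a single pass deciding each device directly;
-- same cost, simpler decomposition.

-- Python's info[key] (dict lookup, first match).  Pre_ guarantees the key is present,
-- so the "" default is never produced.
def pvInfoGet (info : List (String × String)) (k : String) : String :=
  ((PySem.Dict.mk info).get? k).getD ""

-- ===== PORT A =====
def handle_devices_filter_py (devices : List (String × List (String × String))) (logic_or : Bool) (item_in : List (String × List String)) (item_ex : List (String × List String)) : List (String × List (String × String)) :=
  let include_set : PySem.Set String :=
    if item_in = [] then PySem.Set.ofList (devices.map (·.1))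
    else
      let filter_item : List (PySem.Set String) :=
        item_in.foldl (fun acc kv =>
          acc ++ [PySem.Set.ofList
            ((devices.filter (fun p => kv.2.contains (pvInfoGet p.2 kv.1))).map (·.1))]) []
      match filter_item with
      | [] => []  -- unreachable (item_in ≠ []); totalization only
      | s :: rest =>
        if logic_or then rest.foldl PySem.Set.union s else rest.foldl PySem.Set.inter s
  if include_set = [] then []
  else
    let include_set2 : PySem.Set String :=
      if item_ex ≠ [] then
        let filter_item2 : List (PySem.Set String) :=
          item_ex.foldl (fun acc kv =>
            acc ++ [PySem.Set.ofList
              ((devices.filter (fun p => kv.2.contains (pvInfoGet p.2 kv.1))).map (·.1))]) []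
        let exclude_set : PySem.Set String :=
          match filter_item2 with
          | [] => []  -- unreachable (item_ex ≠ []); totalization only
          | s :: rest =>
            if logic_or then rest.foldl PySem.Set.union s else rest.foldl PySem.Set.inter s
        if exclude_set ≠ [] then PySem.Set.diff include_set exclude_set else include_set
      else include_set
    if include_set2 = [] then []
    else devices.filter (fun p => PySem.Set.contains include_set2 p.1)

-- ===== PORT B =====
def pvCombine (logic_or : Bool) (bs : List Bool) : Bool :=
  if logic_or then bs.any id else bs.all id

def pvKeep (logic_or : Bool) (item_in item_ex : List (String × List String)) (info : List (String × String)) : Bool :=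
  if item_in ≠ [] && !pvCombine logic_or (item_in.map (fun kv => kv.2.contains (pvInfoGet info kv.1))) then
    false
  else
    !(item_ex ≠ [] && pvCombine logic_or (item_ex.map (fun kv => kv.2.contains (pvInfoGet info kv.1))))

def handle_devices_filter_py_alt (devices : List (String × List (String × String))) (logic_or : Bool) (item_in : List (String × List String)) (item_ex : List (String × List String)) : List (String × List (String × String)) :=
  devices.filter (fun p => pvKeep logic_or item_in item_ex p.2)

-- ===== PRECONDITION & SPEC =====
-- Pre_ excludes (a) device lists with duplicate device ids — a Python dict cannot contain
-- them, so an association list with duplicates matches no Python input and A's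
-- set-membership filter treats it accidentally — and (b) inputs where some filter key of
-- item_in/item_ex is missing from some device's info, on which A raises KeyError (except
-- when the include filter already comes out empty, where A returns {} before reading
-- item_ex — B returns {} there as well).
def Pre_handle_devices_filter_py (devices : List (String × List (String × String))) (logic_or : Bool) (item_in : List (String × List String)) (item_ex : List (String × List String)) : Prop :=
  (devices.map (·.1)).Nodup ∧
  ∀ p ∈ devices, ∀ kv ∈ item_in ++ item_ex, ((PySem.Dict.mk p.2).get? kv.1).isSome
instance (devices : List (String × List (String × String))) (logic_or : Bool) (item_in : List (String × List String)) (item_ex : List (String × List String)) : Decidable (Pre_handle_devices_filter_py devices logic_or item_in item_ex) := by unfold Pre_handle_devices_filter_py; infer_instance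

def pvWitness_handle_devices_filter_py : (List (String × List (String × String))) × Bool × (List (String × List String)) × (List (String × List String)) :=
  ([("d1", [("k", "1")]), ("d2", [("k", "2")])], true, [("k", ["1", "2"])], [("k", ["2"])])

def Spec_handle_devices_filter_py (devices : List (String × List (String × String))) (logic_or : Bool) (item_in : List (String × List String)) (item_ex : List (String × List String)) (out : List (String × List (String × String))) : Prop := out = handle_devices_filter_py_alt devices logic_or item_in item_ex
instance (devices : List (String × List (String × String))) (logic_or : Bool) (item_in : List (String × List String)) (item_ex : List (String × List String)) (out : List (String × List (String × String))) : Decidable (Spec_handle_devices_filter_py devices logic_or item_in item_ex out) := by unfold Spec_handle_devices_filter_py; infer_instance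

-- ===== CLAIM (what is proved, stated in full; the proofs are below) =====
def Claim_equal_handle_devices_filter_py : Prop := ∀ (devices : List (String × List (String × String))) (logic_or : Bool) (item_in : List (String × List String)) (item_ex : List (String × List String)), Dom_handle_devices_filter_py devices logic_or item_in item_ex → Pre_handle_devices_filter_py devices logic_or item_in item_ex → Spec_handle_devices_filter_py devices logic_or item_in item_ex (handle_devices_filter_py devices logic_or item_in item_ex)

-- ===== LEMMAS AND PROOFS =====

lemma pv_mem_foldl_union {l : List (PySem.Set String)} {s : PySem.Set String} {y : String} :
    y ∈ l.foldl PySem.Set.union s ↔ y ∈ s ∨ ∃ t ∈ l, y ∈ t := by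
  induction l generalizing s with
  | nil => simp
  | cons h t ih => simp [List.foldl, ih, PySem.Set.mem_union]; tauto

lemma pv_mem_foldl_inter {l : List (PySem.Set String)} {s : PySem.Set String} {y : String} :
    y ∈ l.foldl PySem.Set.inter s ↔ y ∈ s ∧ ∀ t ∈ l, y ∈ t := by
  induction l generalizing s with
  | nil => simp
  | cons h t ih => simp [List.foldl, ih, PySem.Set.mem_inter]; tauto

lemma pv_eq_of_fst_nodup {β : Type} {l : List (String × β)} (h : (l.map (·.1)).Nodup)
    {p q : String × β} (hp : p ∈ l) (hq : q ∈ l) (hfst : p.1 = q.1) : p = q := by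
  induction l with
  | nil => cases hp
  | cons a t ih =>
    simp only [List.map_cons, List.nodup_cons] at h
    rcases List.mem_cons.1 hp with rfl | hp' <;> rcases List.mem_cons.1 hq with rfl | hq'
    · rfl
    · exact absurd (hfst ▸ List.mem_map_of_mem hq') h.1
    · exact absurd (hfst ▸ List.mem_map_of_mem hp') h.1
    · exact ih h.2 hp' hq'

-- membership in the did-set A builds for one criterion, for a device of the list
lemma pv_mem_crit_set {devices : List (String × List (String × String))}
    (hnd : (devices.map (·.1)).Nodup) {p : String × List (String × String)} (hp : p ∈ devices)
    (q : String × List (String × String) → Bool) :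
    p.1 ∈ PySem.Set.ofList ((devices.filter q).map (·.1)) ↔ q p = true := by
  rw [PySem.Set.mem_ofList]
  constructor
  · rintro h
    rcases List.mem_map.1 h with ⟨r, hr, hfst⟩
    rcases List.mem_filter.1 hr with ⟨hrmem, hrq⟩
    rwa [pv_eq_of_fst_nodup hnd hp hrmem hfst.symm]
  · intro hq
    exact List.mem_map_of_mem (List.mem_filter.2 ⟨hp, hq⟩)

-- membership in A's combined set (union/intersection over the criteria of `items`),
-- for a device of the list, assuming `items ≠ []`
lemma pv_mem_combined {devices : List (String × List (String × String))}
    (hnd : (devices.map (·.1)).Nodup) {p : String × List (String × String)} (hp : p ∈ devices)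
    (logic_or : Bool) {items : List (String × List String)} (hne : items ≠ []) :
    (p.1 ∈ (match items.foldl (fun acc kv =>
          acc ++ [PySem.Set.ofList
            ((devices.filter (fun r => kv.2.contains (pvInfoGet r.2 kv.1))).map (·.1))]) [] with
      | [] => ([] : PySem.Set String)
      | s :: rest =>
        if logic_or then rest.foldl PySem.Set.union s else rest.foldl PySem.Set.inter s)) ↔
    pvCombine logic_or (items.map (fun kv => kv.2.contains (pvInfoGet p.2 kv.1))) = true := by
  have hS : ∀ kv : String × List String,
      (p.1 ∈ PySem.Set.ofList
          ((devices.filter (fun r => kv.2.contains (pvInfoGet r.2 kv.1))).map (·.1)) ↔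
        kv.2.contains (pvInfoGet p.2 kv.1) = true) :=
    fun kv => pv_mem_crit_set hnd hp _
  rw [PySem.List.foldl_append_singleton_eq_map]
  rcases items with _ | ⟨kv0, rest⟩
  · exact absurd rfl hne
  simp only [List.nil_append, List.map_cons]
  cases logic_or with
  | true =>
    simp only [if_true, pv_mem_foldl_union, List.mem_map, pvCombine, List.any_eq_true]
    constructor
    · rintro (h | ⟨t, ⟨kv, hkv, rfl⟩, h⟩)
      · exact ⟨_, List.mem_cons.2 (Or.inl rfl), (hS kv0).1 h⟩
      · exact ⟨_, List.mem_cons_of_mem _ (List.mem_map.2 ⟨kv, hkv, rfl⟩), (hS kv).1 h⟩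
    · rintro ⟨x, hx, hxt⟩
      rcases List.mem_cons.1 hx with rfl | hx'
      · exact Or.inl ((hS kv0).2 hxt)
      · rcases List.mem_map.1 hx' with ⟨kv, hkv, rfl⟩
        exact Or.inr ⟨_, ⟨kv, hkv, rfl⟩, (hS kv).2 hxt⟩
  | false =>
    simp only [if_false, Bool.false_eq_true, pv_mem_foldl_inter, List.mem_map, pvCombine,
      List.all_eq_true]
    constructor
    · rintro ⟨h0, h⟩ x hx
      rcases List.mem_cons.1 hx with rfl | hx'
      · exact (hS kv0).1 h0
      · rcases List.mem_map.1 hx' with ⟨kv, hkv, rfl⟩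
        exact (hS kv).1 (h _ ⟨kv, hkv, rfl⟩)
    · intro h
      refine ⟨(hS kv0).2 (h _ (List.mem_cons.2 (Or.inl rfl))), ?_⟩
      rintro t ⟨kv, hkv, rfl⟩
      exact (hS kv).2 (h _ (List.mem_cons_of_mem _ (List.mem_map.2 ⟨kv, hkv, rfl⟩)))

-- pvKeep unfolded to the two logical conditions it tests
lemma pv_keep_iff (lo : Bool) (ii ie : List (String × List String)) (info : List (String × String)) :
    pvKeep lo ii ie info = true ↔
      ((ii = [] ∨ pvCombine lo (ii.map (fun kv => kv.2.contains (pvInfoGet info kv.1))) = true) ∧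
        ¬(ie ≠ [] ∧ pvCombine lo (ie.map (fun kv => kv.2.contains (pvInfoGet info kv.1))) = true)) := by
  simp only [pvKeep]
  by_cases hii : ii = [] <;> by_cases hie : ie = [] <;>
    simp [hii, hie]

-- membership in A's include set, for a device of the list
lemma pv_mem_include {devices : List (String × List (String × String))}
    (hnd : (devices.map (·.1)).Nodup) {p : String × List (String × String)} (hp : p ∈ devices)
    (logic_or : Bool) (item_in : List (String × List String)) :
    (p.1 ∈ (if item_in = [] then PySem.Set.ofList (devices.map (·.1))
      else match item_in.foldl (fun acc kv =>
          acc ++ [PySem.Set.ofList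
            ((devices.filter (fun r => kv.2.contains (pvInfoGet r.2 kv.1))).map (·.1))]) [] with
        | [] => ([] : PySem.Set String)
        | s :: rest =>
          if logic_or then rest.foldl PySem.Set.union s else rest.foldl PySem.Set.inter s)) ↔
    (item_in = [] ∨
      pvCombine logic_or (item_in.map (fun kv => kv.2.contains (pvInfoGet p.2 kv.1))) = true) := by
  by_cases hin : item_in = []
  · rw [if_pos hin]
    exact ⟨fun _ => Or.inl hin, fun _ => (PySem.Set.mem_ofList _ _).2 (List.mem_map_of_mem hp)⟩
  · rw [if_neg hin, pv_mem_combined hnd hp logic_or hin]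
    exact ⟨Or.inr, fun h => h.resolve_left hin⟩

-- A's shape over abstract sets: empty-check, empty-check, membership filter
lemma pv_bridge (devices : List (String × List (String × String))) (I I2 : PySem.Set String)
    (keepb : String × List (String × String) → Bool)
    (h2 : ∀ p ∈ devices, (p.1 ∈ I2 ↔ keepb p = true))
    (hsub : ∀ p ∈ devices, keepb p = true → p.1 ∈ I) :
    (if I = [] then ([] : List (String × List (String × String)))
      else if I2 = [] then [] else devices.filter (fun p => PySem.Set.contains I2 p.1)) =
    devices.filter keepb := by
  have hnil : ∀ (J : PySem.Set String), J = [] → (∀ p ∈ devices, keepb p = true → p.1 ∈ J) →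
      devices.filter keepb = [] := by
    intro J hJ hJm
    rw [List.filter_eq_nil_iff]
    intro p hp hk
    have hm := hJm p hp hk
    rw [hJ] at hm
    exact List.not_mem_nil hm
  split
  next hI => exact (hnil I hI hsub).symm
  next =>
    split
    next hI2 => exact (hnil I2 hI2 (fun p hp hk => (h2 p hp).2 hk)).symm
    next =>
      refine List.filter_congr fun p hp => ?_
      exact Bool.eq_iff_iff.mpr (by rw [PySem.Set.contains_iff]; exact h2 p hp)

-- ===== VERDICT (by name: the statement is the Claim_ definition above) =====
theorem handle_devices_filter_py_spec : Claim_equal_handle_devices_filter_py := by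
  intro devices logic_or item_in item_ex _hdom hpre
  obtain ⟨hnd, _hkeys⟩ := hpre
  unfold Spec_handle_devices_filter_py handle_devices_filter_py handle_devices_filter_py_alt
  dsimp only
  refine pv_bridge devices _ _ _ ?_ ?_
  · -- membership in A's remaining set = B's keep test
    intro p hp
    rw [pv_keep_iff]
    by_cases hex : item_ex = []
    · rw [if_neg (not_not_intro hex), pv_mem_include hnd hp logic_or item_in]
      simp [hex]
    · rw [if_pos hex]
      by_cases hE : (match item_ex.foldl (fun acc kv =>
            acc ++ [PySem.Set.ofList
              ((devices.filter (fun r => kv.2.contains (pvInfoGet r.2 kv.1))).map (·.1))]) [] with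
          | [] => ([] : PySem.Set String)
          | s :: rest =>
            if logic_or then rest.foldl PySem.Set.union s else rest.foldl PySem.Set.inter s) = []
      · rw [if_neg (not_not_intro hE), pv_mem_include hnd hp logic_or item_in]
        have hnc : ¬ pvCombine logic_or
            (item_ex.map (fun kv => kv.2.contains (pvInfoGet p.2 kv.1))) = true := by
          intro hc
          have hm := (pv_mem_combined hnd hp logic_or hex).2 hc
          rw [hE] at hm
          exact List.not_mem_nil hm
        constructor
        · exact fun h => ⟨h, fun hx => hnc hx.2⟩
        · exact fun h => h.1
      · rw [if_pos hE, PySem.Set.mem_diff, pv_mem_include hnd hp logic_or item_in,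
          pv_mem_combined hnd hp logic_or hex]
        constructor
        · rintro ⟨h1, h2⟩
          exact ⟨h1, fun hx => h2 hx.2⟩
        · rintro ⟨h1, h2⟩
          exact ⟨h1, fun hc => h2 ⟨hex, hc⟩⟩
  · -- every kept device lies in A's include set
    intro p hp hk
    obtain ⟨hinc, -⟩ := (pv_keep_iff logic_or item_in item_ex p.2).1 hk
    exact (pv_mem_include hnd hp logic_or item_in).2 hinc
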